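-- pv_equiv track=rewrite | github.com/juandiramu/MaquinaTuring | asignarVariable.py | cambiar2
-- ===== SOURCE A (Python) =====
-- def cambiar2(cadena):
--   for i in range(len(cadena)):
--     cadena=list(cadena)
--     if cadena[i]=="X":
--           cadena[i]='0'
--     if cadena[i]=="Y":
--           cadena[i]='1'
--     if cadena[i]=="S":
--           break;
--   return cadena
-- ===== SOURCE B (Python) =====
-- def cambiar2(cadena):
--     # split at the first 'S', bulk-translate only the prefix, keep the rest verbatim
--     pre, s, suf = cadena.partition('S')
--     return list(pre.translate(str.maketrans('XY', '01'))) + list(s + suf)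
-- ===== Notes on version B (the rewrite author's own statement) =====
-- stated objective: faster
-- what changed: B locates the split point up front with partition and bulk-translates only the prefix, instead of A's per-index scan that rebuilds list(cadena) on every iteration; the empty string, on which A returns a str instead of a list, is excluded by Pre_.
-- outside the precondition, e.g. on cambiar2(''): A returns '', B returns []
import Mathlib
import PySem

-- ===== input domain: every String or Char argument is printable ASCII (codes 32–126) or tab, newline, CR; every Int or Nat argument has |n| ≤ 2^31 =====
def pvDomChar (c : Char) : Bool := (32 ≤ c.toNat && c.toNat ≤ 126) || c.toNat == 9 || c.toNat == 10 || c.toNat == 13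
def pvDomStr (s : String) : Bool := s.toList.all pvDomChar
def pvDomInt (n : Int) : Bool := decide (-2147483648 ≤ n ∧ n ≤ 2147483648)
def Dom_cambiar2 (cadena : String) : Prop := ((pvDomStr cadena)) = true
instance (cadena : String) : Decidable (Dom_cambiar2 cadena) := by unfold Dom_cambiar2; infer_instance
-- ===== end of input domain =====

-- B splits at the first 'S' and bulk-translates only the prefix, instead of A's per-index scan with break (objective: simpler).
-- Pre_ excludes only the empty string, where Python A returns '' (a str, not a list of the declared type).


-- ===== PORT A =====
-- one loop step: cadena[i] is rewritten in place (X→0, then Y→1), then the loop breaks if it is 'S'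
def trA (c : Char) : Char :=
  let c := if c = 'X' then '0' else c
  if c = 'Y' then '1' else c

-- A's indexed loop with break, as structural recursion over the remaining characters
def loopA : List Char → List Char
  | [] => []
  | c :: rest =>
    let c' := trA c
    if c' = 'S' then c' :: rest else c' :: loopA rest

def cambiar2 (cadena : String) : List String :=
  (loopA cadena.toList).map (fun c => String.ofList [c])

-- ===== PORT B =====
-- the translate table {X→0, Y→1}
def trB (c : Char) : Char :=
  if c = 'X' then '0' else if c = 'Y' then '1' else c

-- cadena.partition('S') ported by hand as takeWhile/dropWhile at the first 'S' (exact: 'S' is one character)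
def cambiar2_alt (cadena : String) : List String :=
  let cs := cadena.toList
  let pre := cs.takeWhile (· ≠ 'S')
  let suf := cs.dropWhile (· ≠ 'S')
  (pre.map trB ++ suf).map (fun c => String.ofList [c])

-- ===== PRECONDITION & SPEC =====
-- Pre_ excludes ONLY the empty string: there A returns '' (a str, not a value of the declared list type); B returns [].
def Pre_cambiar2 (cadena : String) : Prop := cadena ≠ ""
instance (cadena : String) : Decidable (Pre_cambiar2 cadena) := by unfold Pre_cambiar2; infer_instance
def pvWitness_cambiar2 : String := "XYS"

def Spec_cambiar2 (cadena : String) (out : List String) : Prop := out = cambiar2_alt cadena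
instance (cadena : String) (out : List String) : Decidable (Spec_cambiar2 cadena out) := by unfold Spec_cambiar2; infer_instance

-- ===== CLAIM (what is proved, stated in full; the proofs are below) =====
def Claim_equal_cambiar2 : Prop := ∀ (cadena : String), Dom_cambiar2 cadena → Pre_cambiar2 cadena → Spec_cambiar2 cadena (cambiar2 cadena)

-- ===== LEMMAS AND PROOFS =====
theorem trA_eq_trB (c : Char) : trA c = trB c := by
  unfold trA trB
  split_ifs <;> simp_all

theorem trA_eq_S_iff (c : Char) : trA c = 'S' ↔ c = 'S' := by
  unfold trA
  by_cases hx : c = 'X' <;> by_cases hy : c = 'Y' <;> simp_all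

theorem loopA_eq (cs : List Char) :
    loopA cs = (cs.takeWhile (· ≠ 'S')).map trB ++ cs.dropWhile (· ≠ 'S') := by
  induction cs with
  | nil => simp [loopA]
  | cons c rest ih =>
    by_cases hc : c = 'S'
    · subst hc
      simp [loopA, List.takeWhile, List.dropWhile, trA]
    · have hA : trA c ≠ 'S' := fun h => hc ((trA_eq_S_iff c).mp h)
      have hB : trB c ≠ 'S' := by rw [← trA_eq_trB]; exact hA
      simp [loopA, hB, hc, trA_eq_trB, ih]

-- ===== VERDICT (by name: the statement is the Claim_ definition above) =====
theorem cambiar2_spec : Claim_equal_cambiar2 := by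
  intro cadena _ _
  unfold Spec_cambiar2 cambiar2 cambiar2_alt
  rw [loopA_eq]
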